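-- pv_equiv track=rewrite | github.com/sdcst12-students/b200-teacher-coke | 200a-Review.py | getMerge
-- ===== SOURCE A (Python) =====
-- def getMerge(list1,list2):
--
--     list1 = list(list1) if type(list1) is tuple else list1
--     for i in list2:
--         if i in list1:
--             index = list1.index(i)
--             list1.insert(index + 1, i)
--         else:
--             list1.append(i)
--     list1 = tuple(list1) if type(list1) is tuple else list1
--     return list1
-- ===== SOURCE B (Python) =====
-- def getMerge(list1, list2):
--     # Single pass over list2 with a set + counter dict (O(n+m)); A rescans list1 per element.
--     # Like A, mutates its list argument in place (tuple inputs are copied to a list, as in A).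
--     src = list(list1)
--     seen = set(src)
--     extra = {}          # value -> how many duplicates to place right after its first occurrence
--     tail = []           # new values, in first-appearance order
--     for i in list2:
--         if i in seen:
--             extra[i] = extra.get(i, 0) + 1
--         else:
--             seen.add(i)
--             tail.append(i)
--     out = []
--     done = set()
--     for x in src:
--         out.append(x)
--         if x not in done:
--             done.add(x)
--             out.extend([x] * extra.get(x, 0))
--     for t in tail:
--         out.append(t)
--         out.extend([t] * extra.get(t, 0))
--     if type(list1) is list:
--         list1[:] = out
--         return list1
--     return out
-- ===== Notes on version B (the rewrite author's own statement) =====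
-- stated objective: faster
-- what changed: A rescans list1 ('in', .index, .insert) for every element of list2 (O(n*m)); B makes one counting pass over list2 with a set and a duplicate-counter dict plus a tail of new values, then renders the result in a single pass, never searching or inserting into the middle of a list.
import Mathlib
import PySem

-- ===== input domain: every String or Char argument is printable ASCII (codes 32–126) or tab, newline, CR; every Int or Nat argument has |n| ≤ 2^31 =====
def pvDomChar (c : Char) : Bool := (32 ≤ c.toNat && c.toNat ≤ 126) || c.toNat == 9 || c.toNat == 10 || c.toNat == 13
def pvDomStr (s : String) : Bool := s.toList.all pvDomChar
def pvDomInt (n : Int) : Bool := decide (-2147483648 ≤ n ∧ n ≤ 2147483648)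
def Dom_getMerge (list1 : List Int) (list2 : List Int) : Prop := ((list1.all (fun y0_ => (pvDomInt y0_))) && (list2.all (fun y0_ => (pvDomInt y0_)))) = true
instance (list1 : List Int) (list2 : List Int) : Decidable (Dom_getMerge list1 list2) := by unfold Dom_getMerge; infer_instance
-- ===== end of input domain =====

-- B replaces A's per-element rescans of list1 by one counting pass over list2 (set + counter dict)
-- and a single rendering pass; equivalence is about the RETURN value (A mutates its list argument
-- in place; the Python B performs the same mutation).

-- ===== PORT A =====
-- for i in list2: if i in list1: list1.insert(list1.index(i)+1, i) else: list1.append(i)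
def getMerge (list1 : List Int) (list2 : List Int) : List Int :=
  list2.foldl
    (fun l i =>
      if l.contains i then
        PySem.List.insert l ((((PySem.List.index? l i).getD 0 : Nat) : Int) + 1) i
      else
        l ++ [i])
    list1

-- ===== PORT B =====
-- pass 1 over list2: seen-set + extra-counter dict + tail of new values; pass 2: render.
def getMerge_alt (list1 : List Int) (list2 : List Int) : List Int :=
  let st := list2.foldl
    (fun (st : PySem.Set Int × PySem.Dict Int Int × List Int) i =>
      if PySem.Set.contains st.1 i then
        (st.1, (st.2.1).insert i ((st.2.1).getD i 0 + 1), st.2.2)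
      else
        (PySem.Set.add st.1 i, st.2.1, st.2.2 ++ [i]))
    (PySem.Set.ofList list1, PySem.Dict.empty, ([] : List Int))
  let extra := st.2.1
  let tail := st.2.2
  let p := list1.foldl
    (fun (q : List Int × PySem.Set Int) x =>
      let out := q.1 ++ [x]
      if PySem.Set.contains q.2 x then (out, q.2)
      else (out ++ PySem.List.pyRepeat [x] (extra.getD x 0), PySem.Set.add q.2 x))
    (([] : List Int), PySem.Set.empty)
  tail.foldl (fun out t => (out ++ [t]) ++ PySem.List.pyRepeat [t] (extra.getD t 0)) p.1

-- ===== PRECONDITION & SPEC =====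
def Spec_getMerge (list1 : List Int) (list2 : List Int) (out : List Int) : Prop := out = getMerge_alt list1 list2
instance (list1 : List Int) (list2 : List Int) (out : List Int) : Decidable (Spec_getMerge list1 list2 out) := by unfold Spec_getMerge; infer_instance

-- ===== CLAIM (what is proved, stated in full; the proofs are below) =====
def Claim_equal_getMerge : Prop := ∀ (list1 : List Int) (list2 : List Int), Dom_getMerge list1 list2 → Spec_getMerge list1 list2 (getMerge list1 list2)

-- ===== LEMMAS AND PROOFS =====

-- A's loop body, named
def stepA (l : List Int) (i : Int) : List Int :=
  if l.contains i then
    PySem.List.insert l ((((PySem.List.index? l i).getD 0 : Nat) : Int) + 1) i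
  else
    l ++ [i]

-- B's first-pass body, named
def stepB (st : PySem.Set Int × PySem.Dict Int Int × List Int) (i : Int) :
    PySem.Set Int × PySem.Dict Int Int × List Int :=
  if PySem.Set.contains st.1 i then
    (st.1, (st.2.1).insert i ((st.2.1).getD i 0 + 1), st.2.2)
  else
    (PySem.Set.add st.1 i, st.2.1, st.2.2 ++ [i])

def extD (d : PySem.Dict Int Int) : Int → Int := fun v => d.getD v 0

def bump (e : Int → Int) (i : Int) : Int → Int := fun v => if v = i then e v + 1 else e v

-- render the original list1: each element, plus its extra copies right after its first occurrence
def goR : List Int → List Int → (Int → Int) → List Int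
  | [], _, _ => []
  | x :: xs, done, e =>
    if x ∈ done then x :: goR xs done e
    else x :: (List.replicate (e x).toNat x ++ goR xs (x :: done) e)

-- render the tail of new values
def rtR (tail : List Int) (e : Int → Int) : List Int :=
  tail.flatMap (fun t => t :: List.replicate (e t).toNat t)

theorem getMerge_eq_foldl (l1 l2 : List Int) : getMerge l1 l2 = l2.foldl stepA l1 := rfl

theorem mem_goR (v : Int) (l done : List Int) (e : Int → Int) : v ∈ goR l done e ↔ v ∈ l := by
  induction l generalizing done with
  | nil => simp [goR]
  | cons x xs ih =>
    by_cases h : x ∈ done <;> simp [goR, h, ih, List.mem_replicate] <;> tauto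

theorem mem_rtR (v : Int) (tail : List Int) (e : Int → Int) : v ∈ rtR tail e ↔ v ∈ tail := by
  simp only [rtR, List.mem_flatMap, List.mem_cons, List.mem_replicate]
  constructor
  · rintro ⟨a, ha, h | ⟨-, h⟩⟩ <;> exact h ▸ ha
  · intro h; exact ⟨v, h, Or.inl rfl⟩

theorem goR_congr_done (l d1 d2 : List Int) (e : Int → Int)
    (h : ∀ u, u ∈ d1 ↔ u ∈ d2) : goR l d1 e = goR l d2 e := by
  induction l generalizing d1 d2 with
  | nil => rfl
  | cons x xs ih =>
    by_cases hx : x ∈ d1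
    · simp [goR, hx, (h x).mp hx, ih _ _ h]
    · have hx2 : x ∉ d2 := fun hc => hx ((h x).mpr hc)
      simp [goR, hx, hx2]
      exact ih _ _ (by intro u; simp [h u])

theorem goR_congr_ext (l done : List Int) (e1 e2 : Int → Int)
    (h : ∀ v ∈ l, v ∉ done → e1 v = e2 v) : goR l done e1 = goR l done e2 := by
  induction l generalizing done with
  | nil => rfl
  | cons x xs ih =>
    by_cases hx : x ∈ done
    · simp [goR, hx]; exact ih _ (fun v hv hnd => h v (List.mem_cons_of_mem _ hv) hnd)
    · simp [goR, hx, h x (List.mem_cons_self) hx]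
      exact ih _ (fun v hv hnd => h v (List.mem_cons_of_mem _ hv)
        (fun hc => hnd (List.mem_cons_of_mem _ hc)))

theorem goR_zero (l done : List Int) (e : Int → Int) (h : ∀ v, e v = 0) :
    goR l done e = l := by
  induction l generalizing done with
  | nil => rfl
  | cons x xs ih => by_cases hx : x ∈ done <;> simp [goR, hx, h, ih]

theorem rtR_congr (tail : List Int) (e1 e2 : Int → Int)
    (h : ∀ v ∈ tail, e1 v = e2 v) : rtR tail e1 = rtR tail e2 := by
  induction tail with
  | nil => rfl
  | cons t ts ih =>
    have h1 := h t (by simp)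
    have h2 := ih (fun v hv => h v (List.mem_cons_of_mem _ hv))
    simp only [rtR, List.flatMap_cons] at h2 ⊢
    rw [h1, h2]

theorem stepA_split (pre suf : List Int) (i : Int) (h : i ∉ pre) :
    stepA (pre ++ i :: suf) i = pre ++ i :: i :: suf := by
  have hmem : i ∈ pre ++ i :: suf := by simp
  have hcontains : (pre ++ i :: suf).contains i = true := by
    simpa using hmem
  have hidx : PySem.List.index? (pre ++ i :: suf) i = some pre.length := by
    rw [PySem.List.index?_eq_some_iff]
    exact ⟨pre, suf, rfl, rfl, h⟩
  rw [stepA, if_pos hcontains, hidx]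
  have hcast : (((some pre.length).getD 0 : Nat) : Int) + 1 = ((pre.length + 1 : Nat) : Int) := by
    simp
  rw [hcast, PySem.List.insert_natCast _ _ _ (by simp)]
  have h1 : List.take (pre.length + 1) (pre ++ i :: suf) = pre ++ [i] := by
    rw [List.take_append]
    simp [List.take_of_length_le (by omega : pre.length ≤ pre.length + 1)]
  have h2 : List.drop (pre.length + 1) (pre ++ i :: suf) = suf := by
    rw [List.drop_append]
    simp [List.drop_eq_nil_of_le (by omega : pre.length ≤ pre.length + 1)]
  rw [h1, h2]
  simp

theorem stepA_not_mem (L : List Int) (i : Int) (h : i ∉ L) : stepA L i = L ++ [i] := by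
  unfold stepA
  rw [if_neg (by simpa using h)]

theorem goR_insert (i : Int) (e : Int → Int) (hnn : 0 ≤ e i) :
    ∀ (l done : List Int), i ∈ l → i ∉ done →
    ∃ pre suf, goR l done e = pre ++ i :: suf ∧ i ∉ pre ∧
      goR l done (bump e i) = pre ++ i :: i :: suf := by
  intro l
  induction l with
  | nil => intro done h; simp at h
  | cons x xs ih =>
    intro done hmem hdone
    by_cases hx : x ∈ done
    · have hxi : x ≠ i := fun hc => hdone (hc ▸ hx)
      have hmem' : i ∈ xs := by
        rcases List.mem_cons.mp hmem with h1 | h1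
        · exact absurd h1.symm hxi
        · exact h1
      obtain ⟨pre, suf, h1, h2, h3⟩ := ih done hmem' hdone
      exact ⟨x :: pre, suf, by simp [goR, hx, h1], by simp [h2, Ne.symm hxi], by simp [goR, hx, h3]⟩
    · by_cases hxi : x = i
      · subst hxi
        refine ⟨[], List.replicate (e x).toNat x ++ goR xs (x :: done) e, by simp [goR, hx], by simp, ?_⟩
        have hb : bump e x x = e x + 1 := by simp [bump]
        have hrep : (bump e x x).toNat = (e x).toNat + 1 := by
          rw [hb]; omega
        have hgo : goR xs (x :: done) (bump e x) = goR xs (x :: done) e := by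
          apply goR_congr_ext
          intro v hv hnd
          have : v ≠ x := fun hc => hnd (by simp [hc])
          simp [bump, this]
        simp [goR, hx, hrep, List.replicate_succ, hgo]
      · have hmem' : i ∈ xs := by
          rcases List.mem_cons.mp hmem with h1 | h1
          · exact absurd h1.symm hxi
          · exact h1
        have hdone' : i ∉ x :: done := by
          intro hc
          rcases List.mem_cons.mp hc with h1 | h1
          · exact hxi h1.symm
          · exact hdone h1
        obtain ⟨pre, suf, h1, h2, h3⟩ := ih (x :: done) hmem' hdone'
        refine ⟨x :: (List.replicate (e x).toNat x ++ pre), suf, ?_, ?_, ?_⟩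
        · simp [goR, hx, h1]
        · simp [h2, List.mem_replicate, Ne.symm hxi]
        · have hbx : bump e i x = e x := by simp [bump, hxi]
          simp [goR, hx, hbx, h3]

theorem rtR_insert (i : Int) (e : Int → Int) (hnn : 0 ≤ e i) :
    ∀ (tail : List Int), tail.Nodup → i ∈ tail →
    ∃ pre suf, rtR tail e = pre ++ i :: suf ∧ i ∉ pre ∧
      rtR tail (bump e i) = pre ++ i :: i :: suf := by
  intro tail
  induction tail with
  | nil => intro _ h; simp at h
  | cons t ts ih =>
    intro hnd hmem
    rcases List.nodup_cons.mp hnd with ⟨hnt, hnd'⟩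
    by_cases hti : t = i
    · subst hti
      refine ⟨[], List.replicate (e t).toNat t ++ rtR ts e, by simp [rtR], by simp, ?_⟩
      have hrep : (bump e t t).toNat = (e t).toNat + 1 := by simp [bump]; omega
      have hts : rtR ts (bump e t) = rtR ts e := by
        apply rtR_congr
        intro v hv
        have : v ≠ t := fun hc => hnt (hc ▸ hv)
        simp [bump, this]
      simp only [rtR, List.flatMap_cons] at hts ⊢
      rw [hrep, List.replicate_succ, hts]
      simp [rtR]
    · have hmem' : i ∈ ts := by
        rcases List.mem_cons.mp hmem with h1 | h1
        · exact absurd h1.symm hti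
        · exact h1
      obtain ⟨pre, suf, h1, h2, h3⟩ := ih hnd' hmem'
      refine ⟨t :: (List.replicate (e t).toNat t ++ pre), suf, ?_, ?_, ?_⟩
      · simp [rtR] at h1 ⊢; simp [h1]
      · simp [h2, List.mem_replicate, Ne.symm hti]
      · have hbt : bump e i t = e t := by simp [bump, hti]
        simp [rtR] at h3 ⊢
        simp [hbt, h3]

theorem extD_insert (d : PySem.Dict Int Int) (i : Int) :
    extD (d.insert i (d.getD i 0 + 1)) = bump (extD d) i := by
  funext v
  by_cases h : v = i <;> simp [extD, bump, PySem.Dict.getD_insert, h]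

-- main loop invariant: A's evolving list stays in rendered form
theorem main_inv (l1 : List Int) :
    ∀ (l2 tail : List Int) (d : PySem.Dict Int Int) (seen : PySem.Set Int),
    tail.Nodup → (∀ t ∈ tail, t ∉ l1) →
    (∀ v, 0 ≤ d.getD v 0) → (∀ v, v ∉ l1 → v ∉ tail → d.getD v 0 = 0) →
    (∀ v, v ∈ seen ↔ v ∈ l1 ∨ v ∈ tail) →
    l2.foldl stepA (goR l1 [] (extD d) ++ rtR tail (extD d))
      = goR l1 [] (extD (l2.foldl stepB (seen, d, tail)).2.1)
        ++ rtR (l2.foldl stepB (seen, d, tail)).2.2 (extD (l2.foldl stepB (seen, d, tail)).2.1) := by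
  intro l2
  induction l2 with
  | nil => intro tail d seen _ _ _ _ _; rfl
  | cons i l2 ih =>
    intro tail d seen hnd hdisj hnn hzero hseen
    simp only [List.foldl_cons]
    by_cases hs : i ∈ l1 ∨ i ∈ tail
    · have hmemseen : i ∈ seen := (hseen i).mpr hs
      have hstepB : stepB (seen, d, tail) i = (seen, d.insert i (d.getD i 0 + 1), tail) := by
        simp [stepB, hmemseen]
      rw [hstepB]
      have hbump : extD (d.insert i (d.getD i 0 + 1)) = bump (extD d) i := extD_insert d i
      have hstep : stepA (goR l1 [] (extD d) ++ rtR tail (extD d)) i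
          = goR l1 [] (bump (extD d) i) ++ rtR tail (bump (extD d) i) := by
        rcases hs with hs | hs
        · -- first occurrence is inside the rendered l1 part
          obtain ⟨pre, suf, h1, h2, h3⟩ := goR_insert i (extD d) (hnn i) l1 [] hs (by simp)
          have hit : i ∉ tail := fun hc => hdisj i hc hs
          have hrt : rtR tail (bump (extD d) i) = rtR tail (extD d) := by
            apply rtR_congr; intro v hv
            have : v ≠ i := fun hc => hit (hc ▸ hv)
            simp [bump, this]
          rw [h1, List.append_assoc, List.cons_append, stepA_split pre _ i h2, hrt, h3]
          simp
        · -- first occurrence is inside the rendered tail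
          have hil : i ∉ l1 := fun hc => hdisj i hs hc
          obtain ⟨pre, suf, h1, h2, h3⟩ := rtR_insert i (extD d) (hnn i) tail hnd hs
          have hgo : goR l1 [] (bump (extD d) i) = goR l1 [] (extD d) := by
            apply goR_congr_ext; intro v hv _
            have : v ≠ i := fun hc => hil (hc ▸ hv)
            simp [bump, this]
          have hnpre : i ∉ goR l1 [] (extD d) ++ pre := by
            simp [(mem_goR i l1 [] (extD d)), hil, h2]
          rw [h1, ← List.append_assoc, stepA_split _ suf i hnpre, hgo, h3]
          simp
      rw [hstep, ← hbump]
      apply ih tail _ seen hnd hdisj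
      · intro v
        show (0 : Int) ≤ extD (d.insert i (d.getD i 0 + 1)) v
        rw [hbump]
        simp only [bump, extD]
        split_ifs
        · linarith [hnn v]
        · exact hnn v
      · intro v hv1 hv2
        have hvi : v ≠ i := by
          rintro rfl
          rcases hs with h | h; exact hv1 h; exact hv2 h
        show extD (d.insert i (d.getD i 0 + 1)) v = 0
        rw [hbump]
        simp only [bump, extD, if_neg hvi]
        exact hzero v hv1 hv2
      · exact hseen
    · push_neg at hs
      have hmemseen : i ∉ seen := fun hc => (by rcases (hseen i).mp hc with h | h; exact hs.1 h; exact hs.2 h)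
      have hstepB : stepB (seen, d, tail) i = (PySem.Set.add seen i, d, tail ++ [i]) := by
        simp [stepB, hmemseen]
      rw [hstepB]
      have hni : i ∉ goR l1 [] (extD d) ++ rtR tail (extD d) := by
        simp [mem_goR, mem_rtR, hs.1, hs.2]
      have hext0 : extD d i = 0 := hzero i hs.1 hs.2
      have hstep : stepA (goR l1 [] (extD d) ++ rtR tail (extD d)) i
          = goR l1 [] (extD d) ++ rtR (tail ++ [i]) (extD d) := by
        rw [stepA_not_mem _ i hni]
        simp [rtR, hext0]
      rw [hstep]
      apply ih (tail ++ [i]) d (PySem.Set.add seen i)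
      · refine List.Nodup.append hnd (List.nodup_singleton i) ?_
        intro a ha hai
        simp only [List.mem_singleton] at hai
        exact hs.2 (hai ▸ ha)
      · intro t ht
        rcases List.mem_append.mp ht with h | h
        · exact hdisj t h
        · simp at h; subst h; exact hs.1
      · exact hnn
      · intro v hv1 hv2
        exact hzero v hv1 (fun hc => hv2 (List.mem_append_left _ hc))
      · intro v
        rw [PySem.Set.mem_add, hseen v]
        simp [or_assoc]

-- B's render pass equals goR
theorem pass2_eq (extra : PySem.Dict Int Int) :
    ∀ (l : List Int) (out : List Int) (done : PySem.Set Int),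
    (l.foldl
      (fun (q : List Int × PySem.Set Int) x =>
        let out := q.1 ++ [x]
        if PySem.Set.contains q.2 x then (out, q.2)
        else (out ++ PySem.List.pyRepeat [x] (extra.getD x 0), PySem.Set.add q.2 x))
      (out, done)).1 = out ++ goR l done (extD extra) := by
  intro l
  induction l with
  | nil => intro out done; simp [goR]
  | cons x xs ih =>
    intro out done
    by_cases hx : x ∈ done
    · have hc : PySem.Set.contains done x = true := (PySem.Set.contains_iff done x).mpr hx
      simp only [List.foldl_cons, hc, if_true]
      rw [ih]
      simp [goR, hx]
    · have hc : PySem.Set.contains done x = false := by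
        rw [← Bool.not_eq_true, PySem.Set.contains_iff]; exact hx
      simp only [List.foldl_cons, hc, if_false, Bool.false_eq_true]
      rw [ih]
      rw [goR_congr_done xs (PySem.Set.add done x) (x :: done) (extD extra)
        (by intro u; rw [PySem.Set.mem_add]; simp; tauto)]
      simp [goR, hx, PySem.List.pyRepeat_singleton, extD]
  
-- B's tail pass equals rtR
theorem pass3_eq (extra : PySem.Dict Int Int) :
    ∀ (tail : List Int) (out : List Int),
    tail.foldl (fun out t => (out ++ [t]) ++ PySem.List.pyRepeat [t] (extra.getD t 0)) out
      = out ++ rtR tail (extD extra) := by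
  intro tail
  induction tail with
  | nil => intro out; simp [rtR]
  | cons t ts ih =>
    intro out
    simp only [List.foldl_cons]
    rw [ih]
    simp [rtR, PySem.List.pyRepeat_singleton, extD]

theorem getMerge_alt_eq (l1 l2 : List Int) :
    getMerge_alt l1 l2
      = goR l1 [] (extD (l2.foldl stepB (PySem.Set.ofList l1, PySem.Dict.empty, [])).2.1)
        ++ rtR (l2.foldl stepB (PySem.Set.ofList l1, PySem.Dict.empty, [])).2.2
            (extD (l2.foldl stepB (PySem.Set.ofList l1, PySem.Dict.empty, [])).2.1) := by
  unfold getMerge_alt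
  rw [pass3_eq, pass2_eq]
  rfl

-- ===== VERDICT (by name: the statement is the Claim_ definition above) =====
theorem getMerge_spec : Claim_equal_getMerge := by
  intro l1 l2 _
  unfold Spec_getMerge
  rw [getMerge_eq_foldl, getMerge_alt_eq]
  have h0 : goR l1 [] (extD PySem.Dict.empty) = l1 :=
    goR_zero l1 [] _ (by intro v; simp [extD, PySem.Dict.getD_empty])
  have := main_inv l1 l2 [] PySem.Dict.empty (PySem.Set.ofList l1)
    (by simp) (by simp) (by intro v; simp [PySem.Dict.getD_empty])
    (by intro v _ _; simp [PySem.Dict.getD_empty])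
    (by intro v; rw [PySem.Set.mem_ofList]; simp)
  rw [← this, h0]
  simp [rtR]
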